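-- pv_equiv track=rewrite | github.com/ShawHahnLab/igseqhelper | inst/python/igseqhelper/ambigalign.py | make_iupac_scores
-- ===== SOURCE A (Python) =====
-- IUPAC_DNA = {
--     "A": ("A", ),
--     "C": ("C", ),
--     "G": ("G", ),
--     "T": ("T", ),
--     "R": ("A", "G"),
--     "Y": ("C", "T"),
--     "S": ("C", "G"),
--     "W": ("A", "T"),
--     "K": ("G", "T"),
--     "M": ("A", "C"),
--     "B": ("C", "G", "T"),
--     "D": ("A", "G", "T"),
--     "H": ("A", "C", "T"),
--     "V": ("A", "C", "G"),
--     "N":  ("A", "C", "G", "T")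
--     }
--
-- def make_iupac_scores(s_match=1, s_mismatch=-1):
--     """Create lookup table of IUPAC code pairs to match/mismatch scores.
--
--     Return value is a dictionary containg tuple pairs of single-letter codes,
--     where values are scores for matches or mismatches.  Code pairs containing
--     overlapping nucleotides will be considered a match, anything else, a
--     mismatch.
--
--     For example:
--
--       (A, A): match
--       (A, N): match (N contains A)
--       (A, T): mismatch
--       (C, S): match (S contains C)
--       (S, Y): match (both contain C)
--       (W, S): mismatch (no overlap)
--     """
--     scores = {}
--     for ambig in IUPAC_DNA:
--         bases1 = IUPAC_DNA[ambig]
--         for ambig2 in IUPAC_DNA: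
--             bases2 = IUPAC_DNA[ambig2]
--             for base1 in bases1:
--                 if base1 in bases2:
--                     match = True
--                     break
--             else:
--                 match = False
--             scores[(ambig, ambig2)] = {True: s_match, False: s_mismatch}[match]
--             # special case: N implies neutral
--             if ambig == "N" or ambig2 == "N":
--                 scores[(ambig, ambig2)] = 0
--     return scores
-- ===== SOURCE B (Python) =====
-- IUPAC_DNA = {
--     "A": ("A", ),
--     "C": ("C", ),
--     "G": ("G", ),
--     "T": ("T", ),
--     "R": ("A", "G"),
--     "Y": ("C", "T"),
--     "S": ("C", "G"),
--     "W": ("A", "T"),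
--     "K": ("G", "T"),
--     "M": ("A", "C"),
--     "B": ("C", "G", "T"),
--     "D": ("A", "G", "T"),
--     "H": ("A", "C", "T"),
--     "V": ("A", "C", "G"),
--     "N":  ("A", "C", "G", "T")
--     }
--
-- _BIT = {"A": 1, "C": 2, "G": 4, "T": 8}
--
-- def make_iupac_scores(s_match=1, s_mismatch=-1):
--     """Create lookup table of IUPAC code pairs to match/mismatch scores.
--
--     Same table as before, but each code is first condensed to a 4-bit mask
--     (A=1, C=2, G=4, T=8); two codes match iff their masks intersect, and any
--     pair involving N scores 0.
--     """
--     masks = {}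
--     for code, bases in IUPAC_DNA.items():
--         m = 0
--         for b in bases:
--             m |= _BIT[b]
--         masks[code] = m
--     return {(a, b): 0 if a == "N" or b == "N" else
--                     (s_match if masks[a] & masks[b] else s_mismatch)
--             for a in masks for b in masks}
-- ===== Notes on version B (the rewrite author's own statement) =====
-- stated objective: alternative
-- what changed: Each IUPAC code is condensed once into a 4-bit base mask (A=1,C=2,G=4,T=8); the pair table is then built as a dict comprehension deciding match by a single bitwise AND of the two masks, replacing A's inner for/else scan over expanded base tuples and its insert-then-overwrite handling of the N special case.
import Mathlib
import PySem

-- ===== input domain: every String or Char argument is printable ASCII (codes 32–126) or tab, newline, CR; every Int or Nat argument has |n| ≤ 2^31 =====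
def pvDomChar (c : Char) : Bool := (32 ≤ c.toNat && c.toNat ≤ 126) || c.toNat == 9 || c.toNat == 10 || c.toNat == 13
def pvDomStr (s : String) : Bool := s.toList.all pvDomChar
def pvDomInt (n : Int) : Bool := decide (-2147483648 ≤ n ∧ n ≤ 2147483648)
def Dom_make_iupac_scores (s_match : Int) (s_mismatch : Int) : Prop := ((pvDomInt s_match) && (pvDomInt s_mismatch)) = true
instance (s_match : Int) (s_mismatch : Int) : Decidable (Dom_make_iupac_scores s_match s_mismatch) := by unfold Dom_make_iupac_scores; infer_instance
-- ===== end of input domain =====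

-- B replaces A's inner base-overlap scan with a precomputed 4-bit mask per code and a single
-- bitwise AND per pair (objective: idiomatic/alternative; same output table in the same order).

-- ===== PORT A =====
-- IUPAC_DNA module constant: dict in insertion order
def iupacDNA : PySem.Dict String (List String) := PySem.Dict.ofList
  [("A", ["A"]), ("C", ["C"]), ("G", ["G"]), ("T", ["T"]),
   ("R", ["A", "G"]), ("Y", ["C", "T"]), ("S", ["C", "G"]), ("W", ["A", "T"]),
   ("K", ["G", "T"]), ("M", ["A", "C"]),
   ("B", ["C", "G", "T"]), ("D", ["A", "G", "T"]), ("H", ["A", "C", "T"]),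
   ("V", ["A", "C", "G"]), ("N", ["A", "C", "G", "T"])]

-- A's inner 'for base1 in bases1: if base1 in bases2: break / else:' loop
def aOverlapLoop (bases1 bases2 : List String) : Bool :=
  match bases1 with
  | [] => false
  | b :: rest => if bases2.contains b then true else aOverlapLoop rest bases2

def make_iupac_scores (s_match : Int) (s_mismatch : Int) : List (String × String × Int) :=
  -- 'scores' dict has tuple keys; the required flat-triple type is produced at the end
  let scores : PySem.Dict (String × String) Int :=
    (PySem.Dict.keys iupacDNA).foldl (fun scores ambig =>
      let bases1 := (PySem.Dict.get? iupacDNA ambig).getD []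
      (PySem.Dict.keys iupacDNA).foldl (fun scores ambig2 =>
        let bases2 := (PySem.Dict.get? iupacDNA ambig2).getD []
        let m := aOverlapLoop bases1 bases2
        -- {True: s_match, False: s_mismatch}[match] (key always present)
        let v := (PySem.Dict.get? (PySem.Dict.ofList [(true, s_match), (false, s_mismatch)]) m).getD 0
        let scores := PySem.Dict.insert scores (ambig, ambig2) v
        if ambig == "N" || ambig2 == "N" then PySem.Dict.insert scores (ambig, ambig2) 0 else scores)
        scores)
      PySem.Dict.empty
  scores.items.map (fun kv => (kv.1.1, kv.1.2, kv.2))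

-- ===== PORT B =====
def bBit : PySem.Dict String Int := PySem.Dict.ofList [("A", 1), ("C", 2), ("G", 4), ("T", 8)]

def make_iupac_scores_alt (s_match : Int) (s_mismatch : Int) : List (String × String × Int) :=
  let masks : PySem.Dict String Int :=
    iupacDNA.items.foldl (fun masks cb =>
      let m := cb.2.foldl (fun m b => PySem.Int.bor m ((PySem.Dict.get? bBit b).getD 0)) 0
      PySem.Dict.insert masks cb.1 m) PySem.Dict.empty
  -- dict comprehension over distinct key pairs: emitted directly in iteration order
  (PySem.Dict.keys masks).flatMap (fun a =>
    (PySem.Dict.keys masks).map (fun b =>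
      (a, b,
        if a == "N" || b == "N" then 0
        else if PySem.Int.band ((PySem.Dict.get? masks a).getD 0) ((PySem.Dict.get? masks b).getD 0) ≠ 0
        then s_match else s_mismatch)))

-- ===== PRECONDITION & SPEC =====
def Spec_make_iupac_scores (s_match : Int) (s_mismatch : Int) (out : List (String × String × Int)) : Prop := out = make_iupac_scores_alt s_match s_mismatch
instance (s_match : Int) (s_mismatch : Int) (out : List (String × String × Int)) : Decidable (Spec_make_iupac_scores s_match s_mismatch out) := by unfold Spec_make_iupac_scores; infer_instance

-- ===== CLAIM (what is proved, stated in full; the proofs are below) =====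
def Claim_equal_make_iupac_scores : Prop := ∀ (s_match : Int) (s_mismatch : Int), Dom_make_iupac_scores s_match s_mismatch → Spec_make_iupac_scores s_match s_mismatch (make_iupac_scores s_match s_mismatch)

-- ===== LEMMAS AND PROOFS =====

def keysL : List String :=
  ["A", "C", "G", "T", "R", "Y", "S", "W", "K", "M", "B", "D", "H", "V", "N"]

def maskLit : PySem.Dict String Int := PySem.Dict.ofList
  [("A", 1), ("C", 2), ("G", 4), ("T", 8), ("R", 5), ("Y", 10), ("S", 6), ("W", 9),
   ("K", 12), ("M", 3), ("B", 14), ("D", 13), ("H", 11), ("V", 7), ("N", 15)]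

lemma keys_iupac : PySem.Dict.keys iupacDNA = keysL := by decide

lemma pick_bool (s m : Int) (b : Bool) :
    (PySem.Dict.get? (PySem.Dict.ofList [(true, s), (false, m)]) b).getD 0 = if b then s else m := by
  cases b <;> rfl

lemma body_step (d : PySem.Dict (String × String) Int) (a b : String) (v : Int) :
    (if a == "N" || b == "N" then (PySem.Dict.insert (PySem.Dict.insert d (a, b) v) (a, b) 0)
     else PySem.Dict.insert d (a, b) v)
      = PySem.Dict.insert d (a, b) (if a == "N" || b == "N" then 0 else v) := by
  split_ifs with h
  · exact PySem.Dict.insert_insert_self d (a, b) v 0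
  · rfl

lemma nestedFold (f : String → String → Int) :
    ∀ (outer : List String) (inner : List String) (d : PySem.Dict (String × String) Int),
      outer.Nodup → inner.Nodup → (∀ p ∈ d.items, p.1.1 ∉ outer) →
      (outer.foldl (fun d a => inner.foldl (fun d b => PySem.Dict.insert d (a, b) (f a b)) d) d).items
        = d.items ++ outer.flatMap (fun a => inner.map (fun b => ((a, b), f a b)))
  | [], _, d, _, _, _ => by simp
  | a :: rest, inner, d, ho, hi, hd => by
    have hfresh : ∀ b ∈ inner, d.contains (a, b) = false := by
      intro b _
      cases h : d.contains (a, b) with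
      | false => rfl
      | true =>
        exfalso
        have hk := (PySem.Dict.contains_iff_mem_keys (d := d) (k := (a, b))).mp h
        rcases List.mem_map.mp hk with ⟨p, hp, hpk⟩
        exact hd p hp (by rw [hpk]; exact List.mem_cons_self ..)
    have hmapnd : (inner.map (fun b => (a, b))).Nodup :=
      hi.map (fun x y hxy => by simpa using hxy)
    have hinner := PySem.Dict.items_foldl_insert_fresh inner (fun b => (a, b)) (fun b => f a b) d hfresh hmapnd
    simp only [List.foldl_cons]
    beta_reduce at hinner
    have hd' : ∀ p ∈ (inner.foldl (fun d b => PySem.Dict.insert d (a, b) (f a b)) d).items, p.1.1 ∉ rest := by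
      intro p hp
      rw [hinner] at hp
      rcases List.mem_append.mp hp with h1 | h2
      · exact fun hr => hd p h1 (List.mem_cons_of_mem _ hr)
      · rcases List.mem_map.mp h2 with ⟨b, _, hb⟩
        have : p.1.1 = a := by rw [← hb]
        rw [this]
        exact (List.nodup_cons.mp ho).1
    rw [nestedFold f rest inner _ (List.nodup_cons.mp ho).2 hi hd', hinner]
    simp

lemma masks_eq :
    (iupacDNA.items.foldl (fun masks cb =>
      PySem.Dict.insert masks cb.1
        (cb.2.foldl (fun m b => PySem.Int.bor m ((PySem.Dict.get? bBit b).getD 0)) 0))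
      (PySem.Dict.empty : PySem.Dict String Int)) = maskLit := by decide

lemma keys_maskLit : PySem.Dict.keys maskLit = keysL := by decide

lemma overlap_iff_band : ∀ a ∈ keysL, ∀ b ∈ keysL,
    (aOverlapLoop ((PySem.Dict.get? iupacDNA a).getD []) ((PySem.Dict.get? iupacDNA b).getD []) = true)
      ↔ PySem.Int.band ((PySem.Dict.get? maskLit a).getD 0) ((PySem.Dict.get? maskLit b).getD 0) ≠ 0 := by
  decide

lemma keysL_nodup : keysL.Nodup := by decide

lemma main_eq (s m : Int) : make_iupac_scores s m = make_iupac_scores_alt s m := by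
  simp only [make_iupac_scores, make_iupac_scores_alt, masks_eq, keys_maskLit, keys_iupac,
             pick_bool, body_step]
  rw [nestedFold (fun a b => if a == "N" || b == "N" then 0
        else if aOverlapLoop ((PySem.Dict.get? iupacDNA a).getD []) ((PySem.Dict.get? iupacDNA b).getD []) then s else m)
      keysL keysL PySem.Dict.empty keysL_nodup keysL_nodup (by simp [PySem.Dict.empty])]
  simp only [PySem.Dict.empty, List.nil_append, List.map_flatMap, List.map_map]
  refine List.flatMap_congr ?_
  intro a ha
  refine List.map_congr_left ?_
  intro b hb
  simp only [Function.comp]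
  by_cases hN : (a == "N" || b == "N") = true
  · simp [hN]
  · simp only [hN, if_neg, Bool.not_eq_true] at *
    have h := overlap_iff_band a ha b hb
    simp [h]

-- ===== VERDICT (by name: the statement is the Claim_ definition above) =====
theorem make_iupac_scores_spec : Claim_equal_make_iupac_scores := by
  intro s m _
  show make_iupac_scores s m = make_iupac_scores_alt s m
  exact main_eq s m
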